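-- pv_equiv track=rewrite | github.com/lin13k/practice | GS/cgiving.py | giving
-- ===== SOURCE A (Python) =====
-- import heapq
--
-- def giving(funds):
--     heap = [[0, 'A'], [0, 'B'], [0, 'C']]
--     result = []
--     for fund in funds:
--         c = heapq.heappop(heap)
--         result.append(c[1])
--         c[0] += fund
--         heapq.heappush(heap, c)
--     return result
-- ===== SOURCE B (Python) =====
-- def giving(funds):
--     ta = tb = tc = 0
--     res = []
--     for f in funds:
--         if ta <= tb and ta <= tc:
--             res.append('A')
--             ta += f
--         elif tb <= tc:
--             res.append('B')
--             tb += f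
--         else:
--             res.append('C')
--             tc += f
--     return res
-- ===== Notes on version B (the rewrite author's own statement) =====
-- stated objective: simpler
-- what changed: Replaces the heapq 3-element min-heap of [total, label] pairs by three scalar running totals and an explicit min-of-three comparison chain (<= comparisons reproduce the heap's label-order tie-break), removing the per-step heap sift work.
import Mathlib
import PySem

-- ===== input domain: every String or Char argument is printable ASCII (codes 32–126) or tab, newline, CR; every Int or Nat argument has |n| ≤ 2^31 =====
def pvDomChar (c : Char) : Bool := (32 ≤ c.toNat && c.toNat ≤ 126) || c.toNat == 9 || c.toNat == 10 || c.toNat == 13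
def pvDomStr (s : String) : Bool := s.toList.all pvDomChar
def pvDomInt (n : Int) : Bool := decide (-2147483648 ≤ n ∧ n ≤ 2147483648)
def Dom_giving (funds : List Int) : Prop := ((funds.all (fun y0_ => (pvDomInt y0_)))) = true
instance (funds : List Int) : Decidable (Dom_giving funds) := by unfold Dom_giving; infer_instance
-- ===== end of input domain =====

-- B replaces A's 3-element binary heap (heapq) by three scalar running totals and a
-- min-of-three comparison chain; same return value, no heap machinery (objective: simpler).
-- Note: A mutates no argument; equivalence is about the return value.

-- ===== PORT A =====
-- Python list comparison [t, l] < [t', l'] used by heapq (lexicographic on (Int, String)).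
def pyLt (x y : Int × String) : Bool :=
  decide (x.1 < y.1) || (decide (x.1 = y.1) && decide (x.2 < y.2))

def hDefault : Int × String := (0, "")

-- literal port of CPython heapq._siftdown's while-loop (fuel = heap length bounds the iterations)
def siftdownLoop : Nat → List (Int × String) → Nat → Nat → (Int × String) → List (Int × String) × Nat
  | 0, h, _, pos, _ => (h, pos)
  | fuel+1, h, startpos, pos, newitem =>
    if startpos < pos then
      let parentpos := (pos - 1) / 2
      let parent := h.getD parentpos hDefault
      if pyLt newitem parent then
        siftdownLoop fuel (h.set pos parent) startpos parentpos newitem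
      else (h, pos)
    else (h, pos)

def siftdown (h : List (Int × String)) (startpos pos : Nat) : List (Int × String) :=
  let newitem := h.getD pos hDefault
  let r := siftdownLoop h.length h startpos pos newitem
  r.1.set r.2 newitem

-- literal port of CPython heapq._siftup's while-loop
def siftupLoop : Nat → List (Int × String) → Nat → Nat → List (Int × String) × Nat
  | 0, h, pos, _ => (h, pos)
  | fuel+1, h, pos, endpos =>
    let childpos := 2*pos+1
    if childpos < endpos then
      let rightpos := childpos + 1
      let childpos := if rightpos < endpos && !(pyLt (h.getD childpos hDefault) (h.getD rightpos hDefault)) then rightpos else childpos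
      siftupLoop fuel (h.set pos (h.getD childpos hDefault)) childpos endpos
    else (h, pos)

def siftup (h : List (Int × String)) (pos : Nat) : List (Int × String) :=
  let endpos := h.length
  let startpos := pos
  let newitem := h.getD pos hDefault
  let r := siftupLoop endpos h pos endpos
  siftdown (r.1.set r.2 newitem) startpos r.2

def heappush (h : List (Int × String)) (item : Int × String) : List (Int × String) :=
  let h' := h ++ [item]
  siftdown h' 0 (h'.length - 1)

def heappop (h : List (Int × String)) : Option ((Int × String) × List (Int × String)) :=
  match h.getLast? with
  | none => none            -- Python: IndexError (never reached: heap always has 3 elements)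
  | some lastelt =>
    let h' := h.dropLast
    if h'.isEmpty then some (lastelt, h')
    else
      let returnitem := h'.getD 0 hDefault
      some (returnitem, siftup (h'.set 0 lastelt) 0)

def stepA (st : List (Int × String) × List String) (fund : Int) : List (Int × String) × List String :=
  match heappop st.1 with
  | none => st              -- unreachable: the heap always holds exactly 3 elements
  | some (c, h) => (heappush h (c.1 + fund, c.2), st.2 ++ [c.2])

def giving (funds : List Int) : List String :=
  (funds.foldl stepA ([((0:Int), "A"), (0, "B"), (0, "C")], [])).2

-- ===== PORT B =====
def stepB (st : (Int × Int × Int) × List String) (f : Int) : (Int × Int × Int) × List String :=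
  let a := st.1.1; let b := st.1.2.1; let c := st.1.2.2; let r := st.2
  if a ≤ b ∧ a ≤ c then ((a+f, b, c), r ++ ["A"])
  else if b ≤ c then ((a, b+f, c), r ++ ["B"])
  else ((a, b, c+f), r ++ ["C"])

def giving_alt (funds : List Int) : List String :=
  (funds.foldl stepB ((0, 0, 0), [])).2

-- ===== PRECONDITION & SPEC =====
def Spec_giving (funds : List Int) (out : List String) : Prop := out = giving_alt funds
instance (funds : List Int) (out : List String) : Decidable (Spec_giving funds out) := by unfold Spec_giving; infer_instance

-- ===== CLAIM (what is proved, stated in full; the proofs are below) =====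
def Claim_equal_giving : Prop := ∀ (funds : List Int), Dom_giving funds → Spec_giving funds (giving funds)

-- ===== LEMMAS AND PROOFS =====

-- The heap state always holds the three labelled totals, with the lexicographic minimum at the root.
def HeapInv (h : List (Int × String)) (a b c : Int) : Prop :=
  (h = [(a,"A"),(b,"B"),(c,"C")] ∧ a ≤ b ∧ a ≤ c) ∨
  (h = [(a,"A"),(c,"C"),(b,"B")] ∧ a ≤ b ∧ a ≤ c) ∨
  (h = [(b,"B"),(a,"A"),(c,"C")] ∧ b < a ∧ b ≤ c) ∨
  (h = [(b,"B"),(c,"C"),(a,"A")] ∧ b < a ∧ b ≤ c) ∨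
  (h = [(c,"C"),(a,"A"),(b,"B")] ∧ c < a ∧ c < b) ∨
  (h = [(c,"C"),(b,"B"),(a,"A")] ∧ c < a ∧ c < b)

lemma pyLt_asc (u v : Int) (s t : String) (hst : s < t) :
    pyLt (u, s) (v, t) = decide (u ≤ v) := by
  by_cases h1 : u < v <;> by_cases h2 : u = v <;> simp_all [pyLt] <;> omega

lemma pyLt_desc (u v : Int) (s t : String) (hst : ¬ s < t) :
    pyLt (u, s) (v, t) = decide (u < v) := by
  by_cases h1 : u < v <;> by_cases h2 : u = v <;> simp_all [pyLt]

lemma stepA_eval (x y z : Int × String) (r : List String) (f : Int) :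
    stepA ([x, y, z], r) f =
      ((if pyLt z y = true then
          (if pyLt (x.1+f, x.2) z = true then [(x.1+f,x.2), y, z] else [z, y, (x.1+f,x.2)])
        else
          (if pyLt (x.1+f, x.2) y = true then [(x.1+f,x.2), z, y] else [y, z, (x.1+f,x.2)])),
       r ++ [x.2]) := by
  by_cases h1 : pyLt z y = true
  · by_cases h2 : pyLt (x.1+f, x.2) z = true <;>
      simp [stepA, heappop, heappush, siftup, siftdown, siftupLoop, siftdownLoop, h1, h2]
  · by_cases h2 : pyLt (x.1+f, x.2) y = true <;>
      simp [stepA, heappop, heappush, siftup, siftdown, siftupLoop, siftdownLoop, h1, h2]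

lemma step_sim (a b c f : Int) (h : List (Int × String)) (r : List String)
    (hI : HeapInv h a b c) :
    ∃ a' b' c', stepB ((a,b,c), r) f = ((a',b',c'), (stepA (h,r) f).2) ∧
      HeapInv (stepA (h,r) f).1 a' b' c' := by
  have sAB : ("A":String) < "B" := by simp [String.lt_iff_toList_lt]; decide
  have sAC : ("A":String) < "C" := by simp [String.lt_iff_toList_lt]; decide
  have sBC : ("B":String) < "C" := by simp [String.lt_iff_toList_lt]; decide
  have snBA : ¬ ("B":String) < "A" := by simp [String.lt_iff_toList_lt]; decide
  have snCA : ¬ ("C":String) < "A" := by simp [String.lt_iff_toList_lt]; decide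
  have snCB : ¬ ("C":String) < "B" := by simp [String.lt_iff_toList_lt]; decide
  rcases hI with ⟨hh,h1,h2⟩|⟨hh,h1,h2⟩|⟨hh,h1,h2⟩|⟨hh,h1,h2⟩|⟨hh,h1,h2⟩|⟨hh,h1,h2⟩ <;> subst hh
  · refine ⟨a+f, b, c, ?_, ?_⟩
    · rw [stepA_eval]; simp [stepB, h1, h2]
    · rw [stepA_eval]
      simp only [pyLt_asc _ _ _ _ sAC, pyLt_asc _ _ _ _ sAB, pyLt_desc _ _ _ _ snCB]
      unfold HeapInv
      split_ifs <;> simp_all <;> omega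
  · refine ⟨a+f, b, c, ?_, ?_⟩
    · rw [stepA_eval]; simp [stepB, h1, h2]
    · rw [stepA_eval]
      simp only [pyLt_asc _ _ _ _ sAC, pyLt_asc _ _ _ _ sAB, pyLt_asc _ _ _ _ sBC]
      unfold HeapInv
      split_ifs <;> simp_all <;> omega
  · have hn : ¬ a ≤ b := by omega
    refine ⟨a, b+f, c, ?_, ?_⟩
    · rw [stepA_eval]; simp [stepB, hn, h2]
    · rw [stepA_eval]
      simp only [pyLt_desc _ _ _ _ snCA, pyLt_asc _ _ _ _ sBC, pyLt_desc _ _ _ _ snBA]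
      unfold HeapInv
      split_ifs <;> simp_all <;> omega
  · have hn : ¬ a ≤ b := by omega
    refine ⟨a, b+f, c, ?_, ?_⟩
    · rw [stepA_eval]; simp [stepB, hn, h2]
    · rw [stepA_eval]
      simp only [pyLt_asc _ _ _ _ sAC, pyLt_asc _ _ _ _ sBC, pyLt_desc _ _ _ _ snBA]
      unfold HeapInv
      split_ifs <;> simp_all <;> omega
  · have hn1 : ¬ a ≤ c := by omega
    have hn2 : ¬ b ≤ c := by omega
    refine ⟨a, b, c+f, ?_, ?_⟩
    · rw [stepA_eval]; simp [stepB, hn1, hn2]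
    · rw [stepA_eval]
      simp only [pyLt_desc _ _ _ _ snBA, pyLt_desc _ _ _ _ snCB, pyLt_desc _ _ _ _ snCA]
      unfold HeapInv
      split_ifs <;> simp_all <;> omega
  · have hn1 : ¬ a ≤ c := by omega
    have hn2 : ¬ b ≤ c := by omega
    refine ⟨a, b, c+f, ?_, ?_⟩
    · rw [stepA_eval]; simp [stepB, hn1, hn2]
    · rw [stepA_eval]
      simp only [pyLt_asc _ _ _ _ sAB, pyLt_desc _ _ _ _ snCB, pyLt_desc _ _ _ _ snCA]
      unfold HeapInv
      split_ifs <;> simp_all <;> omega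

lemma fold_sim (funds : List Int) : ∀ (a b c : Int) (h : List (Int × String)) (r : List String),
    HeapInv h a b c →
    (funds.foldl stepA (h, r)).2 = (funds.foldl stepB ((a,b,c), r)).2 := by
  induction funds with
  | nil => intro a b c h r _; rfl
  | cons f fs ih =>
    intro a b c h r hI
    obtain ⟨a', b', c', hB, hI'⟩ := step_sim a b c f h r hI
    simp only [List.foldl_cons, hB]
    have := ih a' b' c' (stepA (h,r) f).1 (stepA (h,r) f).2 hI'
    simpa using this

-- ===== VERDICT (by name: the statement is the Claim_ definition above) =====
theorem giving_spec : Claim_equal_giving := by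
  intro funds _
  unfold Spec_giving giving giving_alt
  exact fold_sim funds 0 0 0 _ [] (Or.inl ⟨rfl, le_refl 0, le_refl 0⟩)
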